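-- pv_equiv track=rewrite | github.com/xiaohuanlin/Algorithms | Leetcode/1807. Evaluate the Bracket Pairs of a String.py | evaluate
-- ===== SOURCE A (Python) =====
-- from typing import List
--
-- def evaluate(s: str, knowledge: List[List[str]]) -> str:
--     maps = dict(knowledge)
--     res = []
--     index = 0
--     while index < len(s):
--         if s[index] == "(":
--             start = index + 1
--             while index < len(s) and s[index] != ")":
--                 index += 1
--             res.append(maps.get(s[start:index], "?"))
--         else:
--             res.append(s[index])
--         index += 1
--     return "".join(res)
-- ===== SOURCE B (Python) =====
-- def evaluate(s, knowledge):
--     maps = dict(knowledge)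
--     res = []
--     buf = []
--     inside = False
--     for ch in s:
--         if inside:
--             if ch == ")":
--                 inside = False
--                 res.append(maps.get("".join(buf), "?"))
--             else:
--                 buf.append(ch)
--         else:
--             if ch == "(":
--                 inside = True
--                 buf = []
--             else:
--                 res.append(ch)
--     if inside:
--         res.append(maps.get("".join(buf), "?"))
--     return "".join(res)
-- ===== Notes on version B (the rewrite author's own statement) =====
-- stated objective: alternative
-- what changed: A's index-based outer while with a nested inner while that scans ahead for ')' is replaced by a single flat for-loop over the characters maintaining an 'inside brackets' flag and a key buffer, with one flush after the loop for an unclosed trailing bracket.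
import Mathlib
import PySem

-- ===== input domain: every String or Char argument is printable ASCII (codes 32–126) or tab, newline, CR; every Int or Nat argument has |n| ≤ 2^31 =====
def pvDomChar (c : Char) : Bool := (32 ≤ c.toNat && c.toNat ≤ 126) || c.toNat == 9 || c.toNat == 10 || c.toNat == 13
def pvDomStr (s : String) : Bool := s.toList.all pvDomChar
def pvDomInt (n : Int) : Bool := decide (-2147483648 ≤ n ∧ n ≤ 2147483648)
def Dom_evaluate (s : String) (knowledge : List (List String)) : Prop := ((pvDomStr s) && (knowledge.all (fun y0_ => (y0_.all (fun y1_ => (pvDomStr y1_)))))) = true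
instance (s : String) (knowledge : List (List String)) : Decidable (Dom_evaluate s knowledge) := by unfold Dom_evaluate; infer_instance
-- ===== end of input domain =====

-- B replaces A's index-based outer/inner while loops by one flat fold over the characters
-- with an 'inside brackets' flag and a key buffer (objective: alternative decomposition, same cost).

-- shared helper: dict(knowledge) (both Pythons build the map the same way; requires 2-element pairs, see Pre_)
def pvBuildMaps (knowledge : List (List String)) : PySem.Dict String String :=
  knowledge.foldl
    (fun d p =>
      match p with
      | [k, v] => d.insert k v
      | _ => d)    -- unreachable inside Pre_evaluate (Python's dict(knowledge) raises there)
    PySem.Dict.empty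

-- ===== PORT A =====
-- inner while: 'while index < len(s) and s[index] != ")": index += 1'
def pvAInner (cs : List Char) (index : Nat) : Nat :=
  if h : index < cs.length then
    if cs[index] ≠ ')' then pvAInner cs (index + 1) else index
  else index
termination_by cs.length - index

theorem pvAInner_ge_aux (n : Nat) : ∀ (cs : List Char) (index : Nat),
    cs.length - index ≤ n → index ≤ pvAInner cs index := by
  induction n with
  | zero =>
    intro cs i hn
    rw [pvAInner]
    split
    · omega
    · exact le_rfl
  | succ n ih =>
    intro cs i hn
    rw [pvAInner]
    split
    · split
      · exact le_trans (by omega) (ih cs (i + 1) (by omega))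
      · exact le_rfl
    · exact le_rfl

theorem pvAInner_ge (cs : List Char) (index : Nat) : index ≤ pvAInner cs index :=
  pvAInner_ge_aux cs.length cs index (by omega)

-- outer while over index, res accumulated as a list of strings, "".join at the end
def pvALoop (cs : List Char) (maps : PySem.Dict String String) (index : Nat) (res : List String) :
    List String :=
  if h : index < cs.length then
    if cs[index] = '(' then
      let start := index + 1
      let j := pvAInner cs index
      pvALoop cs maps (j + 1)
        (res ++ [maps.getD (String.ofList ((cs.drop start).take (j - start))) "?"])
    else
      pvALoop cs maps (index + 1) (res ++ [String.ofList [cs[index]]])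
  else res
termination_by cs.length - index
decreasing_by
  · have := pvAInner_ge cs index; omega
  · omega

def evaluate (s : String) (knowledge : List (List String)) : String :=
  PySem.Str.join "" (pvALoop s.toList (pvBuildMaps knowledge) 0 [])

-- ===== PORT B =====
-- one step of B's flat for-loop; state = (inside, key buffer, result pieces)
def pvBStep (maps : PySem.Dict String String)
    (st : Bool × List Char × List String) (c : Char) : Bool × List Char × List String :=
  match st with
  | (inside, buf, res) =>
    if inside then
      if c = ')' then (false, buf, res ++ [maps.getD (String.ofList buf) "?"])
      else (true, buf ++ [c], res)
    else
      if c = '(' then (true, [], res)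
      else (false, buf, res ++ [String.ofList [c]])

-- the post-loop flush: 'if inside: res.append(maps.get("".join(buf), "?"))'
def pvBFin (maps : PySem.Dict String String) (st : Bool × List Char × List String) :
    List String :=
  if st.1 then st.2.2 ++ [maps.getD (String.ofList st.2.1) "?"] else st.2.2

def evaluate_alt (s : String) (knowledge : List (List String)) : String :=
  let maps := pvBuildMaps knowledge
  PySem.Str.join "" (pvBFin maps (s.toList.foldl (pvBStep maps) (false, [], [])))

-- ===== PRECONDITION & SPEC =====
-- Pre_ excludes knowledge lists containing an inner list whose length is not 2, on which
-- Python's dict(knowledge) raises (TypeError/ValueError) in both A and B.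
def Pre_evaluate (s : String) (knowledge : List (List String)) : Prop :=
  knowledge.all (fun p => p.length = 2) = true
instance (s : String) (knowledge : List (List String)) : Decidable (Pre_evaluate s knowledge) := by
  unfold Pre_evaluate; infer_instance

def pvWitness_evaluate : String × List (List String) := ("(a)b(c)", [["a", "yes"]])

def Spec_evaluate (s : String) (knowledge : List (List String)) (out : String) : Prop :=
  out = evaluate_alt s knowledge
instance (s : String) (knowledge : List (List String)) (out : String) :
    Decidable (Spec_evaluate s knowledge out) := by unfold Spec_evaluate; infer_instance

-- ===== CLAIM (what is proved, stated in full; the proofs are below) =====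
def Claim_equal_evaluate : Prop := ∀ (s : String) (knowledge : List (List String)),
  Dom_evaluate s knowledge → Pre_evaluate s knowledge →
  Spec_evaluate s knowledge (evaluate s knowledge)

-- ===== LEMMAS AND PROOFS =====

-- index (relative) of the first ')' in l, or l.length if none
def pvFind (l : List Char) : Nat :=
  match l with
  | [] => 0
  | c :: t => if c = ')' then 0 else pvFind t + 1

theorem pvFind_le (l : List Char) : pvFind l ≤ l.length := by
  induction l with
  | nil => simp [pvFind]
  | cons c t ih => simp only [pvFind, List.length_cons]; split <;> omega

-- pvAInner computes first-')' search relative to the drop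
theorem pvAInner_eq_aux (n : Nat) : ∀ (cs : List Char) (i : Nat), cs.length - i ≤ n →
    pvAInner cs i = i + pvFind (cs.drop i) := by
  induction n with
  | zero =>
    intro cs i hn
    rw [pvAInner]
    have hd : cs.drop i = [] := List.drop_eq_nil_of_le (by omega)
    simp [show ¬ i < cs.length by omega, hd, pvFind]
  | succ n ih =>
    intro cs i hn
    rw [pvAInner]
    by_cases h : i < cs.length
    · rw [List.drop_eq_getElem_cons h]
      by_cases hne : cs[i] = ')'
      · simp [h, hne, pvFind]
      · simp only [h, hne, ne_eq, not_false_iff, dite_true, if_true, pvFind, if_neg hne]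
        rw [ih cs (i + 1) (by omega)]
        simp only [if_false]
        omega
    · have hd : cs.drop i = [] := List.drop_eq_nil_of_le (by omega)
      simp [h, hd, pvFind]

theorem pvAInner_eq (cs : List Char) (i : Nat) :
    pvAInner cs i = i + pvFind (cs.drop i) :=
  pvAInner_eq_aux cs.length cs i (by omega)

-- the not-inside fold result does not depend on the leftover buffer
theorem pvB_buf_irrel (maps : PySem.Dict String String) (l : List Char)
    (buf buf' : List Char) (res : List String) :
    pvBFin maps (l.foldl (pvBStep maps) (false, buf, res)) =
    pvBFin maps (l.foldl (pvBStep maps) (false, buf', res)) := by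
  induction l generalizing res with
  | nil => simp [pvBFin]
  | cons c t ih =>
    simp only [List.foldl_cons, pvBStep]
    by_cases hc : c = '(' <;> simp [hc, ih]

-- the inside fold: consume to the first ')' (or the end), emit one lookup
theorem pvB_inside (maps : PySem.Dict String String) (l : List Char)
    (buf : List Char) (res : List String) :
    pvBFin maps (l.foldl (pvBStep maps) (true, buf, res)) =
    pvBFin maps ((l.drop (pvFind l + 1)).foldl (pvBStep maps)
      (false, [], res ++ [maps.getD (String.ofList (buf ++ l.take (pvFind l))) "?"])) := by
  induction l generalizing buf res with
  | nil => simp [pvFind, pvBFin]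
  | cons c t ih =>
    by_cases hc : c = ')'
    · simp only [List.foldl_cons, pvBStep, hc, if_true, pvFind]
      simp only [List.drop_succ_cons, List.drop_zero, List.take_zero, List.append_nil]
      exact pvB_buf_irrel maps t buf [] _
    · simp only [List.foldl_cons, pvBStep, hc, if_false, if_true, pvFind]
      rw [ih (buf ++ [c]) res]
      simp [List.append_assoc]

-- main correspondence: A's index loop = B's fold on the remaining characters
theorem pvMain (maps : PySem.Dict String String) :
    ∀ (n : Nat) (cs : List Char) (i : Nat) (res : List String), cs.length - i ≤ n →
    pvALoop cs maps i res =
      pvBFin maps ((cs.drop i).foldl (pvBStep maps) (false, [], res)) := by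
  intro n
  induction n with
  | zero =>
    intro cs i res hn
    have hge : cs.length ≤ i := by omega
    rw [pvALoop]
    simp [Nat.not_lt.mpr hge, List.drop_eq_nil_of_le hge, pvBFin]
  | succ n ih =>
    intro cs i res hn
    by_cases h : i < cs.length
    · rw [List.drop_eq_getElem_cons h, List.foldl_cons]
      by_cases hc : cs[i] = '('
      · rw [pvALoop]
        simp only [h, hc, dite_true, if_true]
        have hinner : pvAInner cs i = i + 1 + pvFind (cs.drop (i + 1)) := by
          rw [pvAInner_eq, List.drop_eq_getElem_cons h]
          simp only [pvFind, hc, if_neg (by decide : ¬ ('(' = ')'))]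
          omega
        have hfle := pvFind_le (cs.drop (i + 1))
        simp only [List.length_drop] at hfle
        rw [ih cs (pvAInner cs i + 1) _ (by omega)]
        simp only [pvBStep, if_true, if_false, Bool.false_eq_true]
        rw [pvB_inside]
        have hdrop : cs.drop (pvAInner cs i + 1) =
            (cs.drop (i + 1)).drop (pvFind (cs.drop (i + 1)) + 1) := by
          rw [List.drop_drop]; congr 1; omega
        have hkey : (cs.drop (i + 1)).take (pvAInner cs i - (i + 1)) =
            (cs.drop (i + 1)).take (pvFind (cs.drop (i + 1))) := by
          congr 1; omega
        rw [hdrop, hkey]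
        simp
      · rw [pvALoop]
        simp only [h, hc, dite_true, if_false]
        rw [ih cs (i + 1) _ (by omega)]
        simp [pvBStep, hc]
    · rw [pvALoop]
      have hd : cs.drop i = [] := List.drop_eq_nil_of_le (by omega)
      simp [h, hd, pvBFin]

-- ===== VERDICT (by name: the statement is the Claim_ definition above) =====
theorem evaluate_spec : Claim_equal_evaluate := by
  intro s knowledge _ _
  unfold Spec_evaluate evaluate evaluate_alt
  rw [pvMain (pvBuildMaps knowledge) s.toList.length s.toList 0 [] (by omega)]
  simp
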